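-- pv_equiv track=rewrite | github.com/MH11097/vietnam-address-normalizer | src/utils/token_coverage.py | calculate_meaningful_tokens
-- ===== SOURCE A (Python) =====
-- from typing import List, Set, Tuple, Dict
--
-- ADMIN_NOISE_WORDS = {
--     'ubnd', 'phong', 'ban', 'cong ty', 'chi nhanh',
--     'van phong', 'so', 'khach san', 'nha hang',
--     'truong', 'benh vien', 'trung tam', 'dai hoc',
--     'to', 'khu', 'cong', 'ty', 'tnhh'
-- }
--
-- def calculate_meaningful_tokens(all_tokens: List[str], noise_words: Set[str] = None) -> List[int]:
--     """
--     Filter out noise words and return indices of meaningful tokens.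
--
--     Args:
--         all_tokens: List of all tokens from input text
--         noise_words: Set of noise words to filter (defaults to ADMIN_NOISE_WORDS)
--
--     Returns:
--         List of indices of meaningful tokens
--
--     Example:
--         all_tokens = ['cong', 'ty', 'phuong', '3', 'quang', 'tri']
--         noise_words = {'cong ty'}
--         → Returns [2, 3, 4, 5] (indices of 'phuong', '3', 'quang', 'tri')
--     """
--     if noise_words is None:
--         noise_words = ADMIN_NOISE_WORDS
--
--     meaningful_indices = []
--
--     for i, token in enumerate(all_tokens):
--         token_lower = token.lower()
--
--         # Check if token itself is noise
--         if token_lower in noise_words: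
--             continue
--
--         # Check if token is part of a multi-word noise phrase
--         # (e.g., "cong" in "cong ty")
--         is_noise = False
--         for noise_phrase in noise_words:
--             if ' ' in noise_phrase:  # Multi-word noise
--                 noise_tokens = noise_phrase.split()
--                 # Check if current position starts a noise phrase
--                 if i + len(noise_tokens) <= len(all_tokens):
--                     potential_phrase = ' '.join(all_tokens[i:i+len(noise_tokens)]).lower()
--                     if potential_phrase == noise_phrase:
--                         is_noise = True
--                         break
--
--         if not is_noise:
--             meaningful_indices.append(i)
--
--     return meaningful_indices
-- ===== SOURCE B (Python) =====
-- ADMIN_NOISE_WORDS = {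
--     'ubnd', 'phong', 'ban', 'cong ty', 'chi nhanh',
--     'van phong', 'so', 'khach san', 'nha hang',
--     'truong', 'benh vien', 'trung tam', 'dai hoc',
--     'to', 'khu', 'cong', 'ty', 'tnhh'
-- }
--
-- def calculate_meaningful_tokens(all_tokens, noise_words=None):
--     if noise_words is None:
--         noise_words = ADMIN_NOISE_WORDS
--     n = len(all_tokens)
--     # Invert A's loop nesting: one scan per multi-word phrase marks every
--     # start position of that phrase; then a single pass collects indices.
--     noise_starts = set()
--     for phrase in noise_words:
--         if ' ' in phrase:
--             k = len(phrase.split())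
--             for i in range(n - k + 1):
--                 if ' '.join(all_tokens[i:i+k]).lower() == phrase:
--                     noise_starts.add(i)
--     return [i for i, token in enumerate(all_tokens)
--             if token.lower() not in noise_words and i not in noise_starts]
-- ===== Notes on version B (the rewrite author's own statement) =====
-- stated objective: faster
-- what changed: Inverts A's loop nesting: instead of testing every noise phrase at every token position (re-splitting each phrase every time), B scans positions once per multi-word phrase (splitting it once) to collect all phrase start positions into a set, then emits indices in a single pass using two set-membership tests.
import Mathlib
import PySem

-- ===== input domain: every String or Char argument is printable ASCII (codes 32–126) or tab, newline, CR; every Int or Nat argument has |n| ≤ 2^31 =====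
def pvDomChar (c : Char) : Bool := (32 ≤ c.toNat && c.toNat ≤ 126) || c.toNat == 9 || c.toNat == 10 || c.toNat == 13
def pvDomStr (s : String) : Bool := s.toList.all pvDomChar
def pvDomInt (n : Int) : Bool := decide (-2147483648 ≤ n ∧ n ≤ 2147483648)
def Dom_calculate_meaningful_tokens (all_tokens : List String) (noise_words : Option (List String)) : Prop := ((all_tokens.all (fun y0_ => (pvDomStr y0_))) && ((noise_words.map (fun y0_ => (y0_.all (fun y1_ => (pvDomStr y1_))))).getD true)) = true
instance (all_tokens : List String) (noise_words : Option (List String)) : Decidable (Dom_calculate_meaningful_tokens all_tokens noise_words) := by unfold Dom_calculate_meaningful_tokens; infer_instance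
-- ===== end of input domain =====

-- B inverts A's loop nesting (positions scanned per multi-word phrase into a start set, then one
-- collecting pass with set lookups) instead of testing every phrase at every position; the timing
-- run measured B faster (single-word noise costs one set lookup per token in B).

-- ===== PORT A =====
def adminNoiseWords : List String :=
  ["ubnd", "phong", "ban", "cong ty", "chi nhanh", "van phong", "so", "khach san",
   "nha hang", "truong", "benh vien", "trung tam", "dai hoc", "to", "khu", "cong", "ty", "tnhh"]

def calculate_meaningful_tokens (all_tokens : List String) (noise_words : Option (List String)) : List Int :=
  let noise := noise_words.getD adminNoiseWords
  (PySem.List.enumerate all_tokens).foldl (fun meaningful_indices p =>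
    let i := p.1
    let token_lower := PySem.Str.lower p.2
    if noise.contains token_lower then meaningful_indices
    else
      let is_noise := noise.any (fun noise_phrase =>
        if PySem.Str.isIn " " noise_phrase then
          let noise_tokens := PySem.Str.split₀ noise_phrase
          if i + (noise_tokens.length : Int) ≤ (all_tokens.length : Int) then
            PySem.Str.lower (PySem.Str.join " "
              (PySem.List.slice all_tokens (some i) (some (i + (noise_tokens.length : Int))))) == noise_phrase
          else false
        else false)
      if is_noise then meaningful_indices else meaningful_indices ++ [i]) []

-- ===== PORT B =====
def calculate_meaningful_tokens_alt (all_tokens : List String) (noise_words : Option (List String)) : List Int :=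
  let noise := noise_words.getD adminNoiseWords
  let n : Int := all_tokens.length
  let noise_starts : PySem.Set Int := noise.foldl (fun s phrase =>
    if PySem.Str.isIn " " phrase then
      (PySem.List.pyRange 0 (n - ((PySem.Str.split₀ phrase).length : Int) + 1) 1).foldl (fun s i =>
        if PySem.Str.lower (PySem.Str.join " "
            (PySem.List.slice all_tokens (some i) (some (i + ((PySem.Str.split₀ phrase).length : Int))))) == phrase
        then PySem.Set.add s i else s) s
    else s) PySem.Set.empty
  (PySem.List.enumerate all_tokens).foldl (fun out p =>
    if !(noise.contains (PySem.Str.lower p.2)) && !(PySem.Set.contains noise_starts p.1)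
    then out ++ [p.1] else out) []

-- ===== PRECONDITION & SPEC =====
def Spec_calculate_meaningful_tokens (all_tokens : List String) (noise_words : Option (List String)) (out : List Int) : Prop := out = calculate_meaningful_tokens_alt all_tokens noise_words
instance (all_tokens : List String) (noise_words : Option (List String)) (out : List Int) : Decidable (Spec_calculate_meaningful_tokens all_tokens noise_words out) := by unfold Spec_calculate_meaningful_tokens; infer_instance

-- ===== CLAIM (what is proved, stated in full; the proofs are below) =====
def Claim_equal_calculate_meaningful_tokens : Prop := ∀ (all_tokens : List String) (noise_words : Option (List String)), Dom_calculate_meaningful_tokens all_tokens noise_words → Spec_calculate_meaningful_tokens all_tokens noise_words (calculate_meaningful_tokens all_tokens noise_words)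

-- ===== LEMMAS AND PROOFS =====

-- membership in a 'collect matching indices' inner fold
lemma mem_foldl_add_if {c : Int → Bool} (l : List Int) (s : PySem.Set Int) (x : Int) :
    x ∈ l.foldl (fun s j => if c j then PySem.Set.add s j else s) s ↔ x ∈ s ∨ (x ∈ l ∧ c x = true) := by
  induction l generalizing s with
  | nil => simp
  | cons j l ih =>
    by_cases hj : c j = true
    · simp only [List.foldl_cons, hj, if_true, ih, PySem.Set.mem_add, List.mem_cons]
      constructor
      · rintro (⟨h | h⟩ | ⟨h, hc⟩)
        · exact Or.inl h
        · exact Or.inr ⟨Or.inl h, h ▸ hj⟩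
        · exact Or.inr ⟨Or.inr h, hc⟩
      · rintro (h | ⟨h | h, hc⟩)
        · exact Or.inl (Or.inl h)
        · exact Or.inl (Or.inr h)
        · exact Or.inr ⟨h, hc⟩
    · simp only [List.foldl_cons, ih, List.mem_cons]
      rw [if_neg hj]
      constructor
      · rintro (h | ⟨h, hc⟩)
        · exact Or.inl h
        · exact Or.inr ⟨Or.inr h, hc⟩
      · rintro (h | ⟨h | h, hc⟩)
        · exact Or.inl h
        · exact absurd (h ▸ hc) hj
        · exact Or.inr ⟨h, hc⟩

-- membership in B's start set, stated abstractly over the per-phrase test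
lemma mem_scan_starts (cond : String → Bool) (kf : String → Int) (N : Int)
    (m : String → Int → Bool) (noise : List String) (s : PySem.Set Int) (x : Int) :
    x ∈ noise.foldl (fun s p =>
        if cond p then
          (PySem.List.pyRange 0 (N - kf p + 1) 1).foldl (fun s i =>
            if m p i then PySem.Set.add s i else s) s
        else s) s
    ↔ x ∈ s ∨ ∃ p ∈ noise, cond p = true ∧ (0 ≤ x ∧ x < N - kf p + 1) ∧ m p x = true := by
  induction noise generalizing s with
  | nil => simp
  | cons p l ih =>
    by_cases hp : cond p = true
    · simp only [List.foldl_cons, hp, if_true, ih, mem_foldl_add_if,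
        PySem.List.mem_pyRange_one, List.exists_mem_cons_iff]
      tauto
    · simp only [List.foldl_cons, ih, List.exists_mem_cons_iff]
      rw [if_neg hp]
      tauto

-- A's nested guard as a conjunction
lemma if_if_eq_true (a : Bool) (c : Prop) [Decidable c] (b : Bool) :
    ((if a then (if c then b else false) else false) = true) ↔ a = true ∧ c ∧ b = true := by
  split_ifs <;> simp_all

-- the two per-token step functions agree once the two noise tests agree
lemma step_eq (a b : Bool) (acc : List Int) (i : Int) :
    (if a then acc else if b then acc else acc ++ [i]) = (if !a && !b then acc ++ [i] else acc) := by
  cases a <;> cases b <;> simp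

-- ===== VERDICT (by name: the statement is the Claim_ definition above) =====
set_option maxHeartbeats 1000000 in
theorem calculate_meaningful_tokens_spec : Claim_equal_calculate_meaningful_tokens := by
  intro all_tokens noise_words _
  unfold Spec_calculate_meaningful_tokens calculate_meaningful_tokens calculate_meaningful_tokens_alt
  apply PySem.List.foldl_congr_mem
  intro acc p hp
  obtain ⟨k, hk, hpk⟩ := (PySem.List.mem_enumerate_iff all_tokens 0 p).1 hp
  subst hpk
  -- per position, A's is_noise test equals membership of the position in B's start set
  have hkey : (noise_words.getD adminNoiseWords).any (fun noise_phrase =>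
      if PySem.Str.isIn " " noise_phrase then
        if ((0:Int) + k) + ((PySem.Str.split₀ noise_phrase).length : Int) ≤ (all_tokens.length : Int) then
          PySem.Str.lower (PySem.Str.join " "
            (PySem.List.slice all_tokens (some ((0:Int) + k))
              (some (((0:Int) + k) + ((PySem.Str.split₀ noise_phrase).length : Int))))) == noise_phrase
        else false
      else false)
      = PySem.Set.contains ((noise_words.getD adminNoiseWords).foldl (fun s phrase =>
          if PySem.Str.isIn " " phrase then
            (PySem.List.pyRange 0 ((all_tokens.length : Int) - ((PySem.Str.split₀ phrase).length : Int) + 1) 1).foldl (fun s i =>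
              if PySem.Str.lower (PySem.Str.join " "
                  (PySem.List.slice all_tokens (some i) (some (i + ((PySem.Str.split₀ phrase).length : Int))))) == phrase
              then PySem.Set.add s i else s) s
          else s) PySem.Set.empty) ((0:Int) + k) := by
    rw [Bool.eq_iff_iff, List.any_eq_true, PySem.Set.contains_iff,
      mem_scan_starts (fun p => PySem.Str.isIn " " p)
        (fun p => ((PySem.Str.split₀ p).length : Int)) (all_tokens.length : Int)
        (fun p i => PySem.Str.lower (PySem.Str.join " "
          (PySem.List.slice all_tokens (some i) (some (i + ((PySem.Str.split₀ p).length : Int))))) == p)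
        (noise_words.getD adminNoiseWords) PySem.Set.empty ((0:Int) + k)]
    have hempty : ((0:Int) + k) ∉ (PySem.Set.empty : PySem.Set Int) := by
      simp [PySem.Set.empty]
    simp only [if_if_eq_true, hempty, false_or]
    constructor
    · rintro ⟨q, hq, h1, h2, h3⟩
      exact ⟨q, hq, h1, ⟨by omega, by omega⟩, h3⟩
    · rintro ⟨q, hq, h1, ⟨h2a, h2b⟩, h3⟩
      exact ⟨q, hq, h1, by omega, h3⟩
  simp only [step_eq]
  rw [hkey]
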